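-- pv_equiv track=rewrite | github.com/pace-systems/py-pipedrive-api | pipedrive/utils.py | append_params
-- ===== SOURCE A (Python) =====
-- def append_params(uri, params, not_first=False):
--     """
--     Appends parameters to a URI.
--
--     :param uri: The URI
--     :param params: The parameters
--     :param not_first: Start with ? or &
--
--     :return: URI with parameters
--     """
--     first_param = not not_first
--     for key, value in params.items():
--         if value and first_param:
--             uri += f"?{key}={value}"
--             first_param = False
--         elif value:
--             uri += f"&{key}={value}"
--     return uri
-- ===== SOURCE B (Python) =====
-- def append_params(uri, params, not_first=False):
--     parts = [f"{key}={value}" for key, value in params.items() if value]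
--     if not parts:
--         return uri
--     return uri + ("&" if not_first else "?") + "&".join(parts)
-- ===== Notes on version B (the rewrite author's own statement) =====
-- stated objective: simpler
-- what changed: Replaces the stateful loop with a mutable first_param flag and per-element if/elif by filter-then-join: collect the non-empty 'key=value' parts once and append a single separator-prefixed '&'.join of them.
import Mathlib
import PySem

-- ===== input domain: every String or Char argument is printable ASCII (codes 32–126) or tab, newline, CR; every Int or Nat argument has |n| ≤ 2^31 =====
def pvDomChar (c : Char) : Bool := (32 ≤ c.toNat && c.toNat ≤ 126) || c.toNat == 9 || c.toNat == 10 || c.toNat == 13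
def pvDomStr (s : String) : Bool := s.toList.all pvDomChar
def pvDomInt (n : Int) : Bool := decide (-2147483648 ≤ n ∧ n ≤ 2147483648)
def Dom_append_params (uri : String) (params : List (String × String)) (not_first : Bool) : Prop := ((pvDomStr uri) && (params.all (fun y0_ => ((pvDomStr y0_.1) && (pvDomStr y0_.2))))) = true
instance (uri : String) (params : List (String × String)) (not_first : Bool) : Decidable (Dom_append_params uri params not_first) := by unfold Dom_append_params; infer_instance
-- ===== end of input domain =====

-- B replaces A's stateful first_param loop by filter-then-join (objective: simpler).

-- ===== PORT A =====
-- A's loop over params.items() carrying the mutable (uri, first_param) state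
def append_params_loopA : List (String × String) → String → Bool → String
  | [], uri, _ => uri
  | (key, value) :: rest, uri, first_param =>
    if value ≠ "" ∧ first_param then
      append_params_loopA rest (uri ++ "?" ++ key ++ "=" ++ value) false
    else if value ≠ "" then
      append_params_loopA rest (uri ++ "&" ++ key ++ "=" ++ value) first_param
    else
      append_params_loopA rest uri first_param

def append_params (uri : String) (params : List (String × String)) (not_first : Bool) : String :=
  append_params_loopA params uri (!not_first)

-- ===== PORT B =====
-- filter-then-join: the non-empty "key=value" parts, joined by "&" ("&".join → PySem.Str.join)
def append_params_alt (uri : String) (params : List (String × String)) (not_first : Bool) : String :=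
  let parts := (params.filter (fun p => p.2 ≠ "")).map (fun p => p.1 ++ "=" ++ p.2)
  if parts = [] then uri
  else uri ++ (if not_first then "&" else "?") ++ PySem.Str.join "&" parts

-- ===== PRECONDITION & SPEC =====
def Spec_append_params (uri : String) (params : List (String × String)) (not_first : Bool) (out : String) : Prop := out = append_params_alt uri params not_first
instance (uri : String) (params : List (String × String)) (not_first : Bool) (out : String) : Decidable (Spec_append_params uri params not_first out) := by unfold Spec_append_params; infer_instance

-- ===== CLAIM (what is proved, stated in full; the proofs are below) =====
def Claim_equal_append_params : Prop := ∀ (uri : String) (params : List (String × String)) (not_first : Bool), Dom_append_params uri params not_first → Spec_append_params uri params not_first (append_params uri params not_first)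

-- ===== LEMMAS AND PROOFS =====

theorem pv_join_cons (sep a : String) (l : List String) (h : l ≠ []) :
    PySem.Str.join sep (a :: l) = a ++ sep ++ PySem.Str.join sep l := by
  cases l with
  | nil => exact absurd rfl h
  | cons b t => simp [PySem.Str.join, PySem.Chars.join_cons_cons, String.append_assoc]

theorem pv_join_singleton (sep a : String) : PySem.Str.join sep [a] = a := by
  simp [PySem.Str.join, PySem.Chars.join_singleton]

theorem pv_loopA_eq (params : List (String × String)) :
    ∀ (uri : String) (first : Bool),
      append_params_loopA params uri first =
        (let parts := (params.filter (fun p => p.2 ≠ "")).map (fun p => p.1 ++ "=" ++ p.2)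
         if parts = [] then uri
         else uri ++ (if first then "?" else "&") ++ PySem.Str.join "&" parts) := by
  induction params with
  | nil => intro uri first; simp [append_params_loopA]
  | cons hd rest ih =>
    intro uri first
    obtain ⟨key, value⟩ := hd
    simp only [ne_eq, decide_not] at ih ⊢
    by_cases hv : value = ""
    · subst hv
      simpa [append_params_loopA, List.filter_cons] using ih uri first
    · rw [List.filter_cons_of_pos (by simpa using hv), List.map_cons]
      cases hrest : (rest.filter (fun p => !decide (p.2 = ""))).map (fun p => p.1 ++ "=" ++ p.2) with
      | nil =>
        cases first <;>
          (simp only [append_params_loopA, ih]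
           simp only [hrest]
           simp [hv, pv_join_singleton, String.append_assoc])
      | cons p ps =>
        rw [pv_join_cons _ _ _ (by simp)]
        cases first <;>
          (simp only [append_params_loopA, ih]
           simp only [hrest]
           simp [hv, String.append_assoc])

-- ===== VERDICT (by name: the statement is the Claim_ definition above) =====
theorem append_params_spec : Claim_equal_append_params := by
  intro uri params not_first _
  unfold Spec_append_params append_params append_params_alt
  rw [pv_loopA_eq]
  cases not_first <;> simp
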